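-- pv_equiv track=rewrite | github.com/tooooooooomy/competition-programming | indeed-2.py | reflowAndJustify
-- ===== SOURCE A (Python) =====
-- def reflowAndJustify(lines, n):
--     words = []
--     for line in lines:
--         words += line.split(' ') # => [] + ['The', 'day', 'began', 'as', 'still']
--                                  # The--day--began-as-still
--                                  # 24 - 18 = 6 % 4 = 2
--     ans = []
--     tmp = [words[0]]
--
--     for i in range(1, len(words)):
--         s = 0
--         for w in tmp:
--             s += len(w)
--
--
--         # the-----night----abruptly n = 25
--         # 25 - 16 = 9 / 2 = 4, 9 % 2 = 1
--         width = s + len(tmp) + len(words[i])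
--         if width > n:
--             if len(tmp) > 1:
--                 mod = (n - s) % (len(tmp)-1)
--                 bases = [(n-s) // (len(tmp)-1)] * (len(tmp)-1)
--                 for j in range(mod):
--                     bases[j] += 1
--
--             string = ''
--             for j in range(len(tmp)-1):
--                 string += tmp[j]
--                 string += '-' * bases[j]
--
--             string += tmp[-1]
--             ans.append(string)
--             tmp = []
--
--         tmp.append(words[i])
--
--     s = 0
--     for w in tmp:
--         s += len(w)
--     if len(tmp) > 1:
--         mod = (n - s) % (len(tmp)-1)
--         bases = [(n-s) // (len(tmp)-1)] * (len(tmp)-1)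
--         for j in range(mod):
--             bases[j] += 1
--
--     string = ''
--     for j in range(len(tmp)-1):
--         string += tmp[j]
--         string += '-' * bases[j]
--
--     string += tmp[-1]
--     ans.append(string)
--
--     return ans
-- ===== SOURCE B (Python) =====
-- def reflowAndJustify(lines, n):
--     # Prefix sums + binary search: each line's end index is found by bisecting
--     # on pref[e] + e - 1, instead of A's incremental greedy re-summing loop.
--     words = [w for line in lines for w in line.split(' ')]
--     pref = [0]
--     for w in words:
--         pref.append(pref[-1] + len(w))
--     m = len(words)
--     ans = []
--     a = 0
--     while a < m:
--         limit = n + pref[a] + a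
--         lo, hi = a + 1, m
--         while lo < hi:
--             mid = (lo + hi + 1) // 2
--             if pref[mid] + mid - 1 <= limit:
--                 lo = mid
--             else:
--                 hi = mid - 1
--         e = lo
--         ans.append(justify(words[a:e], n))
--         a = e
--     return ans
--
--
-- def justify(g, n):
--     if len(g) == 1:
--         return g[0]
--     total = n - sum(len(w) for w in g)
--     q, r = divmod(total, len(g) - 1)
--     return ''.join(w + '-' * (q + (j < r)) for j, w in enumerate(g[:-1])) + g[-1]
-- ===== Notes on version B (the rewrite author's own statement) =====
-- stated objective: faster
-- what changed: A's single interleaved loop that grows a word buffer, re-sums it for every word and flushes with duplicated justification code is replaced by a different algorithm: build a prefix-sum array of word lengths once, find each line's end index by binary search on pref[e]+e-1 (valid because that quantity is strictly increasing, so the greedy break point is the bisection point), and justify each slice with a q/r divmod formula instead of A's replicate-then-bump bases list.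
import Mathlib
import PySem

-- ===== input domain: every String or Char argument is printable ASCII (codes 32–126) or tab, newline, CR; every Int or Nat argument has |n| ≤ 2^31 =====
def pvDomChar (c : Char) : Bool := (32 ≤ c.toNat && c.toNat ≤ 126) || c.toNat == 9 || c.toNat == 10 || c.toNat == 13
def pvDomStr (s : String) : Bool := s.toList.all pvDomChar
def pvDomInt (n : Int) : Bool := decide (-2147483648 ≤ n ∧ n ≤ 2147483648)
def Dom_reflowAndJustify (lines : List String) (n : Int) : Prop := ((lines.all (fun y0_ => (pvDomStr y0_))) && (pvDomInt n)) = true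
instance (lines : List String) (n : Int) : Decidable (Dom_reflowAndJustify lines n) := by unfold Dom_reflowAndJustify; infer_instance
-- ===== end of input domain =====

-- B replaces A's interleaved greedy loop (which re-sums the word buffer per word) by a
-- different algorithm: a prefix-sum array of word lengths plus a binary search on
-- pref[e]+e-1 finds each line's end index; each slice is justified by a q/r divmod
-- formula. Same return value on Pre_; measured faster in a timing run.

-- ===== PORT A =====
-- `bases[j] += 1` loop on `bases = [(n-s)//(len(tmp)-1)] * (len(tmp)-1)`
def aBases (n s : Int) (k : Nat) : List Int :=
  (PySem.List.pyRange 0 (PySem.Int.mod (n - s) (k : Int)) 1).foldl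
    (fun bs j => bs.modify j.toNat (· + 1))
    (List.replicate k (PySem.Int.floordiv (n - s) (k : Int)))

-- `string = ''; for j in range(len(tmp)-1): string += tmp[j]; string += '-' * bases[j]; string += tmp[-1]`
-- (strings accumulated as List Char, exactly Python's code points; tmp[-1] is in range whenever tmp ≠ [])
def aLine (tmp : List String) (bases : List Int) : String :=
  String.ofList
    ((PySem.List.pyRange 0 ((tmp.length : Int) - 1) 1).foldl
      (fun cs j => cs ++ (PySem.List.pyGetD tmp j "").toList
                      ++ PySem.List.pyRepeat ['-'] (PySem.List.pyGetD bases j 0)) []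
     ++ (PySem.List.pyGetD tmp (-1) "").toList)

-- the flush performed both inside the loop and after it (`bases` is only read when len(tmp) > 1)
def aFlush (tmp : List String) (n : Int) : String :=
  let s := tmp.foldl (fun s w => s + PySem.Str.len w) 0
  aLine tmp (if tmp.length > 1 then aBases n s (tmp.length - 1) else [])

-- one iteration of `for i in range(1, len(words))`, state = (ans, tmp)
def aStep (n : Int) (st : List String × List String) (w : String) : List String × List String :=
  let s := st.2.foldl (fun s w => s + PySem.Str.len w) 0
  if s + (st.2.length : Int) + PySem.Str.len w > n then
    (st.1 ++ [aLine st.2 (if st.2.length > 1 then aBases n s (st.2.length - 1) else [])], [w])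
  else
    (st.1, st.2 ++ [w])

def reflowAndJustify (lines : List String) (n : Int) : List String :=
  let words := lines.foldl (fun acc line => acc ++ (PySem.Str.split? line " ").getD []) []
  match words with
  | [] => []   -- Python raises IndexError at words[0]; excluded by Pre_
  | w0 :: rest =>
    let st := rest.foldl (aStep n) ([], [w0])
    st.1 ++ [aFlush st.2 n]

-- ===== PORT B =====
-- `justify(g, n)`: single-word groups as-is, otherwise q/r dash distribution joined in one pass
def bJustify (g : List String) (n : Int) : String :=
  if g.length = 1 then PySem.List.pyGetD g 0 ""
  else
    let total := n - (g.map PySem.Str.len).sum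
    let q := PySem.Int.floordiv total ((g.length : Int) - 1)
    let r := PySem.Int.mod total ((g.length : Int) - 1)
    String.ofList
      ((PySem.List.enumerate (PySem.List.slice g none (some (-1)))).foldl
        (fun cs jw => cs ++ jw.2.toList
                         ++ PySem.List.pyRepeat ['-'] (q + if jw.1 < r then 1 else 0)) []
       ++ (PySem.List.pyGetD g (-1) "").toList)

-- the inner `while lo < hi` bisection on pref[mid] + mid - 1 <= limit
-- (structural recursion on a fuel bounded by hi - lo, which shrinks every iteration;
--  mid = (lo + hi + 1) // 2 is written out at each use)
def bSearchF (f : Nat) (pref : List Int) (limit lo hi : Int) : Int :=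
  match f with
  | 0 => lo
  | f + 1 =>
    if lo < hi then
      if PySem.List.pyGetD pref (PySem.Int.floordiv (lo + hi + 1) 2) 0
           + PySem.Int.floordiv (lo + hi + 1) 2 - 1 ≤ limit then
        bSearchF f pref limit (PySem.Int.floordiv (lo + hi + 1) 2) hi
      else bSearchF f pref limit lo (PySem.Int.floordiv (lo + hi + 1) 2 - 1)
    else lo

def bSearch (pref : List Int) (limit lo hi : Int) : Int :=
  bSearchF (hi - lo).toNat pref limit lo hi

-- the outer `while a < m` loop: bisect the line end e, justify the slice, continue at e
-- (fuel bounded by m - a, which shrinks every iteration since e ≥ a + 1)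
def bWhileF (f : Nat) (words : List String) (pref : List Int) (n m a : Int) : List String :=
  match f with
  | 0 => []
  | f + 1 =>
    if a < m then
      bJustify (PySem.List.slice words (some a)
          (some (bSearch pref (n + PySem.List.pyGetD pref a 0 + a) (a + 1) m))) n
        :: bWhileF f words pref n m (bSearch pref (n + PySem.List.pyGetD pref a 0 + a) (a + 1) m)
    else []

def bWhile (words : List String) (pref : List Int) (n m a : Int) : List String :=
  bWhileF (m - a).toNat words pref n m a

def reflowAndJustify_alt (lines : List String) (n : Int) : List String :=
  let words := lines.flatMap (fun line => (PySem.Str.split? line " ").getD [])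
  let pref := words.foldl (fun p w => p ++ [PySem.List.pyGetD p (-1) 0 + PySem.Str.len w]) [(0 : Int)]
  bWhile words pref n (words.length : Int) 0

-- ===== PRECONDITION & SPEC =====
-- Pre_ excludes only lines = []: there words == [] and Python's words[0] raises IndexError in A.
def Pre_reflowAndJustify (lines : List String) (n : Int) : Prop := lines ≠ []
instance (lines : List String) (n : Int) : Decidable (Pre_reflowAndJustify lines n) := by
  unfold Pre_reflowAndJustify; infer_instance
def pvWitness_reflowAndJustify : List String × Int := (["a b", "c"], 9)

def Spec_reflowAndJustify (lines : List String) (n : Int) (out : List String) : Prop := out = reflowAndJustify_alt lines n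
instance (lines : List String) (n : Int) (out : List String) : Decidable (Spec_reflowAndJustify lines n out) := by unfold Spec_reflowAndJustify; infer_instance

-- ===== CLAIM (what is proved, stated in full; the proofs are below) =====
def Claim_equal_reflowAndJustify : Prop := ∀ (lines : List String) (n : Int), Dom_reflowAndJustify lines n → Pre_reflowAndJustify lines n → Spec_reflowAndJustify lines n (reflowAndJustify lines n)

-- ===== LEMMAS AND PROOFS =====

theorem aStep_eq (n : Int) (ans tmp : List String) (w : String) :
    aStep n (ans, tmp) w
      = if (tmp.map PySem.Str.len).sum + (tmp.length : Int) + PySem.Str.len w > n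
        then (ans ++ [aFlush tmp n], [w]) else (ans, tmp ++ [w]) := by
  simp only [aStep, aFlush, PySem.List.foldl_add, zero_add]

theorem foldBump (m : Nat) (bs : List Int) (i : Nat) (hi : i < bs.length) (hm : m ≤ bs.length) :
    ((PySem.List.pyRange 0 (m : Int) 1).foldl (fun bs (j : Int) => bs.modify j.toNat (· + 1)) bs)[i]?
      = some (bs[i] + if i < m then 1 else 0) := by
  induction m with
  | zero =>
    simp only [Nat.cast_zero]
    rw [show PySem.List.pyRange 0 (0 : Int) 1 = [] from rfl]
    simp [List.getElem?_eq_getElem hi]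
  | succ m ih =>
    rw [show ((m + 1 : Nat) : Int) = (m : Int) + 1 by push_cast; ring]
    rw [PySem.List.pyRange_one_succ_right (by positivity)]
    rw [List.foldl_append]
    simp only [List.foldl_cons, List.foldl_nil, Int.toNat_natCast]
    rw [List.getElem?_modify]
    rw [ih (by omega)]
    rw [show ∀ (f : Int → Int) (x : Int), f <$> some x = some (f x) from fun _ _ => rfl]
    rw [Option.some.injEq]
    rcases eq_or_ne m i with rfl | hne
    · rw [if_pos rfl, if_neg (by omega), if_pos (by omega)]; ring
    · rw [if_neg hne]
      by_cases h : i < m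
      · rw [if_pos h, if_pos (by omega)]
      · rw [if_neg h, if_neg (by omega)]

theorem aBases_getD (n s : Int) (k : Nat) (hk : 0 < k) (j : Nat) (hj : j < k) :
    PySem.List.pyGetD (aBases n s k) (j : Int) 0
      = PySem.Int.floordiv (n - s) (k : Int)
        + (if (j : Int) < PySem.Int.mod (n - s) (k : Int) then 1 else 0) := by
  have hk' : (0 : Int) < (k : Int) := by exact_mod_cast hk
  have hr0 : 0 ≤ PySem.Int.mod (n - s) (k : Int) := PySem.Int.mod_nonneg _ hk'
  have hrk : PySem.Int.mod (n - s) (k : Int) < (k : Int) := PySem.Int.mod_lt _ hk'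
  unfold aBases
  rw [show PySem.Int.mod (n - s) (k : Int)
        = (((PySem.Int.mod (n - s) (k : Int)).toNat : Nat) : Int) by omega]
  have hb := foldBump (PySem.Int.mod (n - s) (k : Int)).toNat
      (List.replicate k (PySem.Int.floordiv (n - s) (k : Int))) j
      (by simpa using hj) (by simp; omega)
  rw [PySem.List.pyGetD_natCast, List.getD_eq_getElem?_getD, hb]
  simp only [List.getElem_replicate, Option.getD_some]
  congr 1
  by_cases hc : j < (PySem.Int.mod (n - s) (k : Int)).toNat
  · rw [if_pos hc, if_pos (by omega)]
  · rw [if_neg hc, if_neg (by omega)]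

theorem aFlush_single (w : String) (n : Int) : aFlush [w] n = w := by
  unfold aFlush aLine
  dsimp only
  norm_num
  rw [PySem.List.pyGetD_neg_one _ _ (by simp : ([w] : List String) ≠ [])]
  simp

theorem bJustify_single (w : String) (n : Int) : bJustify [w] n = w := by
  unfold bJustify
  dsimp only
  rw [if_pos (by simp)]
  simp [PySem.List.pyGetD_zero_cons]

theorem aFlush_eq_bJustify (tmp : List String) (n : Int) (h : tmp ≠ []) :
    aFlush tmp n = bJustify tmp n := by
  rcases eq_or_ne tmp.length 1 with h1 | h1
  · obtain ⟨w, rfl⟩ : ∃ w, tmp = [w] := by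
      cases tmp with
      | nil => simp at h1
      | cons a t => cases t with
        | nil => exact ⟨a, rfl⟩
        | cons b t => simp at h1
    rw [aFlush_single, bJustify_single]
  · have h2 : 2 ≤ tmp.length := by
      cases tmp with
      | nil => exact absurd rfl h
      | cons a t => cases t with
        | nil => simp at h1
        | cons b t => simp
    unfold aFlush aLine bJustify
    dsimp only
    rw [if_neg h1, if_pos (by omega : tmp.length > 1)]
    rw [PySem.List.foldl_add, zero_add]
    congr 1
    congr 1
    rw [PySem.List.slice_to_neg_one, PySem.List.enumerate_eq_map_pyRange tmp.dropLast ""]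
    rw [List.foldl_map, PySem.List.len_eq, List.length_dropLast]
    rw [show ((tmp.length - 1 : Nat) : Int) = (tmp.length : Int) - 1 by omega]
    apply PySem.List.foldl_congr_mem
    intro acc j hj
    rw [PySem.List.mem_pyRange_one] at hj
    obtain ⟨jn, rfl⟩ : ∃ jn : Nat, j = (jn : Int) := ⟨j.toNat, by omega⟩
    have hjn : jn < tmp.length - 1 := by omega
    congr 2
    · rw [PySem.List.pyGetD_natCast, PySem.List.pyGetD_natCast,
          List.getD_eq_getElem?_getD, List.getD_eq_getElem?_getD,
          List.getElem?_dropLast, if_pos hjn]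
    · rw [aBases_getD n _ (tmp.length - 1) (by omega) jn hjn]
      rw [show ((tmp.length - 1 : Nat) : Int) = (tmp.length : Int) - 1 by omega]

theorem bWhileF_neg (f : Nat) (words : List String) (pref : List Int) (n m a : Int)
    (h : ¬ a < m) : bWhileF f words pref n m a = [] := by
  cases f <;> simp [bWhileF, h]

theorem bWhile_neg (words : List String) (pref : List Int) (n m a : Int) (h : ¬ a < m) :
    bWhile words pref n m a = [] := by
  unfold bWhile
  exact bWhileF_neg _ _ _ _ _ _ h

-- reference greedy grouping, the midpoint both ports are reduced to
def chunks (n : Int) (cur : List String) : List String → List (List String)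
  | [] => [cur]
  | w :: ws =>
    if (cur.map PySem.Str.len).sum + (cur.length : Int) + PySem.Str.len w > n
    then cur :: chunks n [w] ws
    else chunks n (cur ++ [w]) ws

-- A's loop followed by the final flush computes the justified chunks
theorem A_to_chunks (n : Int) (ws : List String) (ans cur : List String) (hc : cur ≠ []) :
    (ws.foldl (aStep n) (ans, cur)).1 ++ [aFlush (ws.foldl (aStep n) (ans, cur)).2 n]
      = ans ++ (chunks n cur ws).map (fun g => bJustify g n) := by
  induction ws generalizing ans cur with
  | nil =>
    simp only [List.foldl_nil, chunks]
    rw [aFlush_eq_bJustify cur n hc]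
    simp
  | cons w t ih =>
    simp only [List.foldl_cons, aStep_eq, chunks]
    by_cases hcond : (cur.map PySem.Str.len).sum + (cur.length : Int) + PySem.Str.len w > n
    · rw [if_pos hcond, if_pos hcond, aFlush_eq_bJustify cur n hc]
      rw [ih (ans ++ [bJustify cur n]) [w] (by simp)]
      simp
    · rw [if_neg hcond, if_neg hcond]
      exact ih ans (cur ++ [w]) (by simp)

-- ---- prefix sums ----
def psum (ws : List String) (i : Nat) : Int := ((ws.take i).map PySem.Str.len).sum

def pAcc (x : Int) : List String → List Int
  | [] => []
  | w :: ws => (x + PySem.Str.len w) :: pAcc (x + PySem.Str.len w) ws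

theorem foldl_pref (ws : List String) (p : List Int) (x : Int) :
    ws.foldl (fun p w => p ++ [PySem.List.pyGetD p (-1) 0 + PySem.Str.len w]) (p ++ [x])
      = p ++ x :: pAcc x ws := by
  induction ws generalizing p x with
  | nil => simp [pAcc]
  | cons w t ih =>
    simp only [List.foldl_cons, pAcc]
    rw [PySem.List.pyGetD_neg_one_append_singleton]
    rw [show (p ++ [x]) ++ [x + PySem.Str.len w] = p ++ [x] ++ [x + PySem.Str.len w] from rfl]
    rw [ih (p ++ [x]) (x + PySem.Str.len w)]
    simp

theorem pAcc_getD (ws : List String) (x : Int) (i : Nat) (hi : i ≤ ws.length) :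
    (x :: pAcc x ws).getD i 0 = x + psum ws i := by
  induction ws generalizing x i with
  | nil =>
    have hz : i = 0 := Nat.le_zero.mp hi
    subst hz
    simp [psum]
  | cons w t ih =>
    cases i with
    | zero => simp [psum]
    | succ i =>
      simp only [pAcc, List.getD_cons_succ]
      rw [ih (x + PySem.Str.len w) i (by simpa using hi)]
      simp only [psum, List.take_succ_cons, List.map_cons, List.sum_cons]
      ring

theorem len_nonneg (w : String) : 0 ≤ PySem.Str.len w := by
  simp [PySem.Str.len_eq]

theorem psum_succ (ws : List String) (i : Nat) (hi : i < ws.length) :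
    psum ws (i + 1) = psum ws i + PySem.Str.len ws[i] := by
  unfold psum
  rw [show ws.take (i + 1) = ws.take i ++ [ws[i]] by
        rw [List.take_succ, List.getElem?_eq_getElem hi]; rfl]
  rw [List.map_append, List.sum_append]
  simp

theorem psum_mono (ws : List String) (i j : Nat) (hij : i ≤ j) (hj : j ≤ ws.length) :
    psum ws i ≤ psum ws j := by
  induction j with
  | zero =>
    have hz : i = 0 := Nat.le_zero.mp hij
    subst hz
    exact le_refl _
  | succ j ih =>
    rcases Nat.eq_or_lt_of_le hij with rfl | hlt
    · exact le_refl _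
    · have h1 := ih (by omega) (by omega)
      have h2 := len_nonneg (ws[j]'(by omega))
      rw [psum_succ ws j (by omega)]
      omega

theorem seg_sum (ws : List String) (a e : Nat) (hae : a ≤ e) (he : e ≤ ws.length) :
    (((ws.drop a).take (e - a)).map PySem.Str.len).sum = psum ws e - psum ws a := by
  have h : ws.take e = ws.take a ++ (ws.drop a).take (e - a) := by
    rw [← List.take_add]
    congr 1
    omega
  unfold psum
  rw [h]
  simp

theorem seg_len (ws : List String) (a e : Nat) (hae : a ≤ e) (he : e ≤ ws.length) :
    ((ws.drop a).take (e - a)).length = e - a := by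
  simp [List.length_take, List.length_drop]
  omega

theorem seg_succ (ws : List String) (a j : Nat) (haj : a ≤ j) (hj : j < ws.length) :
    (ws.drop a).take (j - a) ++ [ws[j]] = (ws.drop a).take (j + 1 - a) := by
  rw [show j + 1 - a = (j - a) + 1 by omega, List.take_succ]
  have hlt : j - a < (ws.drop a).length := by simp [List.length_drop]; omega
  rw [List.getElem?_eq_getElem hlt]
  congr 1
  simp
  congr 1
  omega

-- greedy chunking of a line delimited by the fit condition psum e + e - 1 ≤ n + psum a + a
theorem chunk_extend (n : Int) (ws : List String) (a e : Nat)
    (he : e ≤ ws.length)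
    (hfit : ∀ i : Nat, a + 1 ≤ i → i < e → psum ws (i + 1) + (i + 1) - 1 ≤ n + psum ws a + a)
    (hstop : e = ws.length ∨ ¬ (psum ws (e + 1) + (e + 1) - 1 ≤ n + psum ws a + a)) :
    ∀ j : Nat, a < j → j ≤ e →
    chunks n ((ws.drop a).take (j - a)) (ws.drop j)
      = ((ws.drop a).take (e - a))
          :: (if he' : e < ws.length
              then chunks n ((ws.drop e).take 1) (ws.drop (e + 1)) else []) := by
  intro j
  induction hd : e - j generalizing j with
  | zero =>
    intro haj hje
    have hj : j = e := by omega
    subst hj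
    rcases Nat.lt_or_ge j ws.length with hlt | hge
    · rw [List.drop_eq_getElem_cons hlt]
      simp only [chunks]
      have hsum := seg_sum ws a j (by omega) (by omega)
      have hlen := seg_len ws a j (by omega) (by omega)
      have hps := psum_succ ws j hlt
      have hcond : (((ws.drop a).take (j - a)).map PySem.Str.len).sum
            + ((((ws.drop a).take (j - a)).length : Nat) : Int) + PySem.Str.len ws[j] > n := by
        rcases hstop with h | h
        · omega
        · rw [hsum, hlen]
          push_cast
          omega
      rw [if_pos hcond, dif_pos hlt]
      rfl
    · have hj : j = ws.length := by omega
      rw [hj, List.drop_length]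
      simp only [chunks]
      rw [dif_neg (by omega)]
  | succ d ih =>
    intro haj hje
    have hjlt : j < e := by omega
    have hjw : j < ws.length := by omega
    rw [List.drop_eq_getElem_cons hjw]
    simp only [chunks]
    have hsum := seg_sum ws a j (by omega) (by omega)
    have hlen := seg_len ws a j (by omega) (by omega)
    have hps := psum_succ ws j hjw
    have hf := hfit j (by omega) hjlt
    have hcond : ¬ ((((ws.drop a).take (j - a)).map PySem.Str.len).sum
          + ((((ws.drop a).take (j - a)).length : Nat) : Int) + PySem.Str.len ws[j] > n) := by
      rw [hsum, hlen]
      push_cast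
      omega
    rw [if_neg hcond, seg_succ ws a j (by omega) hjw]
    exact ih (j + 1) (by omega) (by omega) (by omega)

-- binary-search boundary facts, by induction on the fuel
theorem bSearchF_spec (pref : List Int) (limit : Int) (f : Nat) :
    ∀ (lo hi : Int), lo ≤ hi → (hi - lo).toNat ≤ f →
    lo ≤ bSearchF f pref limit lo hi ∧ bSearchF f pref limit lo hi ≤ hi
      ∧ (lo < bSearchF f pref limit lo hi →
           PySem.List.pyGetD pref (bSearchF f pref limit lo hi) 0 + bSearchF f pref limit lo hi - 1 ≤ limit)
      ∧ (bSearchF f pref limit lo hi < hi →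
           ¬ (PySem.List.pyGetD pref (bSearchF f pref limit lo hi + 1) 0 + (bSearchF f pref limit lo hi + 1) - 1 ≤ limit)) := by
  induction f with
  | zero =>
    intro lo hi h hf
    have hle : lo = hi := by omega
    subst hle
    simp only [bSearchF]
    exact ⟨le_refl _, le_refl _, by omega, by omega⟩
  | succ f ih =>
    intro lo hi h hf
    simp only [bSearchF]
    split
    · rename_i hlt
      have hb := PySem.Int.floordiv_two_mid_bounds (show lo + 1 ≤ hi by omega)
      have h1 : (lo + 1) + hi = lo + hi + 1 := by ring
      rw [h1] at hb
      set mid := PySem.Int.floordiv (lo + hi + 1) 2 with hmid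
      split
      · rename_i hfit
        have ihx := ih mid hi (by omega) (by omega)
        refine ⟨by omega, ihx.2.1, ?_, ihx.2.2.2⟩
        intro _
        rcases eq_or_lt_of_le ihx.1 with heq | hlt2
        · rw [← heq]; exact hfit
        · exact ihx.2.2.1 hlt2
      · rename_i hnofit
        have ihx := ih lo (mid - 1) (by omega) (by omega)
        refine ⟨ihx.1, by omega, ihx.2.2.1, ?_⟩
        intro _
        rcases eq_or_lt_of_le ihx.2.1 with heq | hlt2
        · rw [heq]
          simpa using hnofit
        · exact ihx.2.2.2 (by omega)
    · exact ⟨le_refl _, h, by omega, by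
        intro hh
        omega⟩

theorem bSearch_spec (pref : List Int) (limit lo hi : Int) (h : lo ≤ hi) :
    lo ≤ bSearch pref limit lo hi ∧ bSearch pref limit lo hi ≤ hi
      ∧ (lo < bSearch pref limit lo hi →
           PySem.List.pyGetD pref (bSearch pref limit lo hi) 0 + bSearch pref limit lo hi - 1 ≤ limit)
      ∧ (bSearch pref limit lo hi < hi →
           ¬ (PySem.List.pyGetD pref (bSearch pref limit lo hi + 1) 0 + (bSearch pref limit lo hi + 1) - 1 ≤ limit)) :=
  bSearchF_spec pref limit _ lo hi h (le_refl _)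

-- B's while loop computes the justified chunks too (induction on the fuel)
theorem B_to_chunksF (n : Int) (ws : List String) (f : Nat) :
    ∀ (a : Nat), a < ws.length → ws.length - a ≤ f →
    bWhileF f ws (0 :: pAcc 0 ws) n (ws.length : Int) (a : Int)
      = (chunks n ((ws.drop a).take 1) (ws.drop (a + 1))).map (fun g => bJustify g n) := by
  have hgetD : ∀ i : Nat, i ≤ ws.length →
      PySem.List.pyGetD (0 :: pAcc 0 ws) (i : Int) 0 = psum ws i := by
    intro i hi
    rw [PySem.List.pyGetD_natCast]
    rw [pAcc_getD ws 0 i hi]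
    ring
  induction f with
  | zero => intro a ha hf; omega
  | succ f ih =>
    intro a ha hf
    simp only [bWhileF]
    rw [if_pos (show (a : Int) < (ws.length : Int) by exact_mod_cast ha)]
    set limit := n + PySem.List.pyGetD (0 :: pAcc 0 ws) (a : Int) 0 + (a : Int) with hlim
    have hsp := bSearch_spec (0 :: pAcc 0 ws) limit ((a : Int) + 1) (ws.length : Int)
        (by exact_mod_cast ha)
    set e := bSearch (0 :: pAcc 0 ws) limit ((a : Int) + 1) (ws.length : Int) with hee
    obtain ⟨he1, he2, he3, he4⟩ := hsp
    have heN : e = ((e.toNat : Nat) : Int) := by omega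
    set eN := e.toNat with heNdef
    have haeN : a + 1 ≤ eN := by omega
    have heNm : eN ≤ ws.length := by omega
    have hlim' : limit = n + psum ws a + (a : Int) := by
      rw [hlim, hgetD a (by omega)]
    -- chunk_extend hypotheses
    have hfit : ∀ i : Nat, a + 1 ≤ i → i < eN →
        psum ws (i + 1) + ((i : Int) + 1) - 1 ≤ n + psum ws a + a := by
      intro i h1 h2
      have hfe : psum ws eN + (eN : Int) - 1 ≤ n + psum ws a + a := by
        have := he3 (by omega)
        rw [heN, hgetD eN heNm, hlim'] at this
        push_cast at this ⊢
        omega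
      have hm := psum_mono ws (i + 1) eN (by omega) heNm
      push_cast
      omega
    have hstop : eN = ws.length ∨ ¬ (psum ws (eN + 1) + ((eN : Int) + 1) - 1 ≤ n + psum ws a + a) := by
      rcases Nat.eq_or_lt_of_le heNm with hq | hq
      · exact Or.inl hq
      · right
        have := he4 (by omega)
        rw [heN] at this
        rw [show ((eN : Int) + 1) = ((eN + 1 : Nat) : Int) by push_cast; ring] at this
        rw [hgetD (eN + 1) (by omega), hlim'] at this
        intro hcon
        exact this (by push_cast at hcon ⊢; omega)
    have hch := chunk_extend n ws a eN heNm
        (by intro i hi1 hi2; have := hfit i hi1 hi2; push_cast at this ⊢; omega) hstop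
        (a + 1) (by omega) haeN
    rw [show a + 1 - a = 1 by omega] at hch
    rw [hch]
    rw [List.map_cons]
    congr 1
    · congr 1
      rw [heN, PySem.List.slice_natCast]
    · split
      · rename_i hlt
        rw [heN]
        exact ih eN hlt (by omega)
      · rename_i hge
        rw [bWhileF_neg _ _ _ _ _ _ (by omega)]
        simp

theorem B_to_chunks0 (n : Int) (ws : List String) (hne : ws ≠ []) :
    bWhile ws (0 :: pAcc 0 ws) n (ws.length : Int) 0
      = (chunks n (ws.take 1) (ws.drop 1)).map (fun g => bJustify g n) := by
  have hlen : 0 < ws.length := List.length_pos_iff.mpr hne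
  have := B_to_chunksF n ws ((ws.length : Int) - 0).toNat 0 hlen (by omega)
  unfold bWhile
  simpa using this

-- ===== VERDICT (by name: the statement is the Claim_ definition above) =====
theorem reflowAndJustify_spec : Claim_equal_reflowAndJustify := by
  intro lines n _ _
  unfold Spec_reflowAndJustify reflowAndJustify reflowAndJustify_alt
  rw [PySem.List.foldl_append_eq_flatMap]
  simp only [List.nil_append]
  rw [show ([(0 : Int)] : List Int) = [] ++ [(0 : Int)] from rfl, foldl_pref]
  simp only [List.nil_append]
  cases h : lines.flatMap (fun line => (PySem.Str.split? line " ").getD []) with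
  | nil => rw [bWhile_neg _ _ _ _ _ (by simp)]
  | cons w0 rest =>
    dsimp only
    rw [A_to_chunks n rest [] [w0] (by simp)]
    rw [B_to_chunks0 n (w0 :: rest) (by simp)]
    simp
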